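-- pv_equiv track=rewrite | github.com/Saracas-Code/CLASSIFICATIONS-PROBABILISTES | projet.py | ConnexSets
-- ===== SOURCE A (Python) =====
-- def ConnexSets(list_arcs):
--     """
--     Crée une liste des ensembles d'attributs connectés à partir d'une liste d'arcs.
--
--     Parameters
--     ----------
--     list_arcs : list of tuple
--         Liste d'arcs où chaque arc est représenté par un tuple (attribut1, attribut2, poids).
--
--     Returns
--     -------
--     list of set
--         Liste d'ensembles d'attributs connectés.
--     """
--     connex_sets = []
--
--     for arc in list_arcs:
--         a, b, _ = arc  # Extraire les attributs a et b
--         set_a, set_b = None, None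
--
--         # Vérifier si a ou b est déjà dans un ensemble existant
--         for s in connex_sets:
--             if a in s:
--                 set_a = s
--             if b in s:
--                 set_b = s
--
--         if set_a and set_b:
--             if set_a != set_b:
--                 # Fusionner les ensembles s'ils sont distincts
--                 set_a.update(set_b)
--                 connex_sets.remove(set_b)
--         elif set_a:
--             # Ajouter b à l'ensemble contenant a
--             set_a.add(b)
--         elif set_b:
--             # Ajouter a à l'ensemble contenant b
--             set_b.add(a)
--         else:
--             # Créer un nouveau ensemble avec a et b
--             connex_sets.append(set([a, b]))
--
--     return connex_sets
-- ===== SOURCE B (Python) =====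
-- def ConnexSets(list_arcs):
--     """Same result as A: list of connected-component sets of the arc endpoints,
--     in A's order (merge keeps the first component's slot), but computed with a
--     direct element->component index instead of scanning every set per arc."""
--     comp_of = {}   # element -> component id
--     members = {}   # component id -> list of members; dict order = output order
--     next_id = 0
--     for a, b, _ in list_arcs:
--         ca = comp_of.get(a)
--         cb = comp_of.get(b)
--         if ca is not None and cb is not None:
--             if ca != cb:
--                 mb = members[cb]
--                 for x in mb:
--                     comp_of[x] = ca
--                 members[ca].extend(mb)
--                 del members[cb]
--         elif ca is not None:
--             comp_of[b] = ca
--             members[ca].append(b)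
--         elif cb is not None:
--             comp_of[a] = cb
--             members[cb].append(a)
--         else:
--             comp_of[a] = next_id
--             comp_of[b] = next_id
--             members[next_id] = [a] if a == b else [a, b]
--             next_id += 1
--     return [set(m) for m in members.values()]
-- ===== Notes on version B (the rewrite author's own statement) =====
-- stated objective: faster
-- what changed: Replaces the per-arc linear scan over all existing sets with an element-to-component dict index plus a component-id-to-members dict (merge relabels the absorbed component's members), so each arc is handled by O(1) lookups plus work proportional to the absorbed component's size.
import Mathlib
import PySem

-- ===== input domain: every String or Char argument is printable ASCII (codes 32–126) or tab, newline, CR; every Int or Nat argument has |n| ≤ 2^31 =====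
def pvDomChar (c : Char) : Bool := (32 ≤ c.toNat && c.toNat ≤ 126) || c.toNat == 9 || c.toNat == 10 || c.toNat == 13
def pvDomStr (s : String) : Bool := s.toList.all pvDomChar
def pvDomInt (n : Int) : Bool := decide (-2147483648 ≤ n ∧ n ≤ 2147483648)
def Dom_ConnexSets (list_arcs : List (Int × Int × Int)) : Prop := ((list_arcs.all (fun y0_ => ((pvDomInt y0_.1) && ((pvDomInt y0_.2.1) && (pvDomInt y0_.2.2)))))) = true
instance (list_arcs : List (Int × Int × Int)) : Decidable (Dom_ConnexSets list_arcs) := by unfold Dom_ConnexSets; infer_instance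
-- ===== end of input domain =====

-- B replaces A's per-arc scan over all existing sets by an element→component-id dict
-- plus a component-id→members dict (objective: faster; same return value proved below).

-- ===== PORT A =====
-- connex_sets.remove(set_b): drop the first set == set_b (Python list.remove with set
-- equality); the [] case is Python's ValueError, unreachable in A since set_b is in the list.
def pyRemoveSet (l : List (PySem.Set Int)) (t : PySem.Set Int) : List (PySem.Set Int) :=
  match l with
  | [] => []
  | s :: r => if PySem.Set.equal s t then r else s :: pyRemoveSet r t

-- the inner 'for s in connex_sets' loop; the set references set_a/set_b are rendered as the
-- positions of the (last) sets containing a resp. b, exactly as the loop overwrites them.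
def scanSets (css : List (PySem.Set Int)) (a b : Int) : Option Nat × Option Nat :=
  css.zipIdx.foldl
    (fun acc p =>
      ((if PySem.Set.contains p.1 a then some p.2 else acc.1),
       (if PySem.Set.contains p.1 b then some p.2 else acc.2)))
    (none, none)

-- one iteration of A's 'for arc in list_arcs' loop
def stepA (css : List (PySem.Set Int)) (arc : Int × Int × Int) : List (PySem.Set Int) :=
  let a := arc.1
  let b := arc.2.1
  let sab := scanSets css a b
  let setA := sab.1.map (fun i => css.getD i [])
  let setB := sab.2.map (fun i => css.getD i [])
  -- Python truthiness: 'set_a and set_b' is true iff both are (non-empty) sets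
  let tA : Bool := match setA with | some s => !s.isEmpty | none => false
  let tB : Bool := match setB with | some s => !s.isEmpty | none => false
  if tA && tB then
    if !(PySem.Set.equal (setA.getD []) (setB.getD [])) then
      -- set_a.update(set_b); connex_sets.remove(set_b)
      pyRemoveSet (css.set (sab.1.getD 0) (PySem.Set.update (setA.getD []) (setB.getD []))) (setB.getD [])
    else css
  else if tA then css.set (sab.1.getD 0) (PySem.Set.add (setA.getD []) b)
  else if tB then css.set (sab.2.getD 0) (PySem.Set.add (setB.getD []) a)
  else css ++ [PySem.Set.ofList [a, b]]

def ConnexSets (list_arcs : List (Int × Int × Int)) : List (List Int) :=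
  list_arcs.foldl stepA []

-- ===== PORT B =====
-- one iteration of B's loop; state = (comp_of, members, next_id)
def stepB (st : PySem.Dict Int Int × PySem.Dict Int (List Int) × Int) (arc : Int × Int × Int) :
    PySem.Dict Int Int × PySem.Dict Int (List Int) × Int :=
  let compOf := st.1
  let members := st.2.1
  let nextId := st.2.2
  let a := arc.1
  let b := arc.2.1
  match compOf.get? a, compOf.get? b with
  | some ca, some cb =>
    if ca ≠ cb then
      let mb := members.getD cb []
      (mb.foldl (fun d x => d.insert x ca) compOf,
       (members.modify ca [] (fun m => m ++ mb)).erase cb, nextId)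
    else st
  | some ca, none =>
    (compOf.insert b ca, members.modify ca [] (fun m => m ++ [b]), nextId)
  | none, some cb =>
    (compOf.insert a cb, members.modify cb [] (fun m => m ++ [a]), nextId)
  | none, none =>
    ((compOf.insert a nextId).insert b nextId,
     members.insert nextId (if a == b then [a] else [a, b]), nextId + 1)

def ConnexSets_alt (list_arcs : List (Int × Int × Int)) : List (List Int) :=
  (list_arcs.foldl stepB (PySem.Dict.empty, PySem.Dict.empty, 0)).2.1.values.map
    (fun m => PySem.Set.ofList m)

-- ===== PRECONDITION & SPEC =====
def Spec_ConnexSets (list_arcs : List (Int × Int × Int)) (out : List (List Int)) : Prop := out = ConnexSets_alt list_arcs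
instance (list_arcs : List (Int × Int × Int)) (out : List (List Int)) : Decidable (Spec_ConnexSets list_arcs out) := by unfold Spec_ConnexSets; infer_instance

-- ===== CLAIM (what is proved, stated in full; the proofs are below) =====
def Claim_equal_ConnexSets : Prop := ∀ (list_arcs : List (Int × Int × Int)), Dom_ConnexSets list_arcs → Spec_ConnexSets list_arcs (ConnexSets list_arcs)

-- ===== LEMMAS AND PROOFS =====

-- the invariant tying A's list of sets (= members.values) to B's two dicts
def PVInv (compOf : PySem.Dict Int Int) (members : PySem.Dict Int (List Int)) (nextId : Int) : Prop :=
  members.keys.Nodup ∧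
  (∀ p ∈ members.items, p.2 ≠ [] ∧ p.2.Nodup) ∧
  (∀ p ∈ members.items, ∀ q ∈ members.items, p.1 ≠ q.1 → ∀ x ∈ p.2, x ∉ q.2) ∧
  (∀ x c, compOf.get? x = some c ↔ ∃ m, (c, m) ∈ members.items ∧ x ∈ m) ∧
  (∀ p ∈ members.items, p.1 < nextId)

theorem foldl_prod_split {α β γ : Type} (l : List γ) (F : α → γ → α) (G : β → γ → β)
    (x : α) (y : β) :
    l.foldl (fun acc p => (F acc.1 p, G acc.2 p)) (x, y) = (l.foldl F x, l.foldl G y) := by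
  induction l generalizing x y with
  | nil => rfl
  | cons h t ih => simp [List.foldl_cons, ih]

theorem scanSets_eq (css : List (PySem.Set Int)) (a b : Int) :
    scanSets css a b =
      (css.zipIdx.foldl (fun acc p => if PySem.Set.contains p.1 a then some p.2 else acc) none,
       css.zipIdx.foldl (fun acc p => if PySem.Set.contains p.1 b then some p.2 else acc) none) := by
  rw [scanSets]
  exact foldl_prod_split css.zipIdx
    (fun acc1 p => if PySem.Set.contains p.1 a then some p.2 else acc1)
    (fun acc2 p => if PySem.Set.contains p.1 b then some p.2 else acc2) none none

theorem scan_none (l : List (PySem.Set Int)) (a : Int) (n : Nat) (acc : Option Nat)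
    (h : ∀ s ∈ l, a ∉ s) :
    (l.zipIdx n).foldl (fun acc p => if PySem.Set.contains p.1 a then some p.2 else acc) acc = acc := by
  induction l generalizing n acc with
  | nil => rfl
  | cons s t ih =>
    have hs : PySem.Set.contains s a = false := by
      simpa using h s (by simp)
    simp only [List.zipIdx_cons, List.foldl_cons, hs]
    exact ih (n + 1) acc (fun u hu => h u (by simp [hu]))

theorem scan_found (l1 : List (PySem.Set Int)) (s : PySem.Set Int) (l2 : List (PySem.Set Int))
    (a : Int) (n : Nat) (acc : Option Nat) (ha : a ∈ s) (h2 : ∀ t ∈ l2, a ∉ t) :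
    ((l1 ++ s :: l2).zipIdx n).foldl
      (fun acc p => if PySem.Set.contains p.1 a then some p.2 else acc) acc
      = some (n + l1.length) := by
  induction l1 generalizing n acc with
  | nil =>
    have hs : PySem.Set.contains s a = true := by simpa using ha
    simp only [List.nil_append, List.zipIdx_cons, List.foldl_cons, hs, if_pos]
    simpa using scan_none l2 a (n+1) (some n) h2
  | cons u t ih =>
    simp only [List.cons_append, List.zipIdx_cons, List.foldl_cons]
    rw [ih (n+1) _]
    simp; omega

theorem set_at_len {α : Type} (l1 : List α) (x v : α) (l2 : List α) :
    (l1 ++ x :: l2).set l1.length v = l1 ++ v :: l2 := by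
  induction l1 with
  | nil => rfl
  | cons h t ih => simp [List.set_cons_succ, ih]

theorem pyRemoveSet_eq_filter (l : List (PySem.Set Int)) (t : PySem.Set Int)
    (h : l.countP (fun s => PySem.Set.equal s t) ≤ 1) :
    pyRemoveSet l t = l.filter (fun s => !PySem.Set.equal s t) := by
  induction l with
  | nil => rfl
  | cons s r ih =>
    rw [List.countP_cons] at h
    by_cases hs : PySem.Set.equal s t = true
    · rw [if_pos (by simpa using hs)] at h
      have hr : r.countP (fun s => PySem.Set.equal s t) = 0 := by omega
      have hnone : ∀ x ∈ r, ¬ (PySem.Set.equal x t = true) := by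
        intro x hx hxt
        have := List.countP_eq_zero.mp hr x hx
        simp [hxt] at this
      simp [pyRemoveSet, hs]
      exact (List.filter_eq_self.mpr (fun x hx => by simp [hnone x hx])).symm
    · have h' : r.countP (fun s => PySem.Set.equal s t) ≤ 1 := by omega
      simp [pyRemoveSet, hs, ih h']

theorem get?_foldl_insert_const (l : List Int) (c : Int) (d : PySem.Dict Int Int) (y : Int) :
    (l.foldl (fun d x => d.insert x c) d).get? y = if y ∈ l then some c else d.get? y := by
  induction l generalizing d with
  | nil => simp
  | cons x t ih =>
    simp only [List.foldl_cons, ih, List.mem_cons]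
    by_cases hy : y ∈ t
    · simp [hy]
    · by_cases hx : y = x
      · simp [hy, hx, PySem.Dict.get?_insert_self]
      · rw [PySem.Dict.get?_insert]
        simp [hy, hx]

theorem map_replace_split (u v : List (Int × List Int)) (ca : Int) (ma w : List Int)
    (hu : ∀ p ∈ u, p.1 ≠ ca) (hv : ∀ p ∈ v, p.1 ≠ ca) :
    (u ++ (ca, ma) :: v).map (fun p => if p.1 == ca then (ca, w) else p) = u ++ (ca, w) :: v := by
  rw [List.map_append, List.map_cons]
  rw [List.map_congr_left (l := u) (f := fun p => if p.1 == ca then (ca, w) else p) (g := id)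
      (fun p hp => by simp [hu p hp])]
  rw [List.map_congr_left (l := v) (f := fun p => if p.1 == ca then (ca, w) else p) (g := id)
      (fun p hp => by simp [hv p hp])]
  simp

theorem equal_refl_set (s : PySem.Set Int) : PySem.Set.equal s s = true := by
  rw [PySem.Set.equal_iff _ _]; intro x; rfl

theorem equal_false_left {s t : PySem.Set Int} (x : Int) (hx : x ∈ s) (hxt : x ∉ t) :
    PySem.Set.equal s t = false := by
  cases hE : PySem.Set.equal s t with
  | false => rfl
  | true => exact absurd (((PySem.Set.equal_iff _ _).mp hE x).mp hx) hxt

theorem equal_false_right {s t : PySem.Set Int} (x : Int) (hx : x ∈ t) (hxs : x ∉ s) :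
    PySem.Set.equal s t = false := by
  cases hE : PySem.Set.equal s t with
  | false => rfl
  | true => exact absurd (((PySem.Set.equal_iff _ _).mp hE x).mpr hx) hxs

theorem val_unique (members : PySem.Dict Int (List Int)) (hk : members.keys.Nodup)
    {c : Int} {m m' : List Int} (h1 : (c, m) ∈ members.items) (h2 : (c, m') ∈ members.items) :
    m = m' := by
  have e1 := PySem.Dict.get?_of_mem_items _ h1 hk
  have e2 := PySem.Dict.get?_of_mem_items _ h2 hk
  rw [e1] at e2
  exact Option.some.inj e2

theorem keys_facts (members : PySem.Dict Int (List Int)) (hk1 : members.keys.Nodup)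
    {u v : List (Int × List Int)} {ca : Int} {ma : List Int}
    (hsplit : members.items = u ++ (ca, ma) :: v) :
    (∀ p ∈ u, p.1 ≠ ca) ∧ (∀ p ∈ v, p.1 ≠ ca) := by
  have hn : ((u.map (fun p => p.1)) ++ ca :: (v.map (fun p => p.1))).Nodup := by
    simpa [PySem.Dict.keys, hsplit] using hk1
  rw [List.nodup_append] at hn
  constructor
  · intro p hp hpc
    exact hn.2.2 ca (List.mem_map.mpr ⟨p, hp, hpc⟩) ca (by simp) rfl
  · intro p hp hpc
    exact (List.nodup_cons.mp hn.2.1).1 (List.mem_map.mpr ⟨p, hp, hpc⟩)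

theorem get?_at_len {α : Type} (l1 : List α) (x : α) (l2 : List α) :
    (l1 ++ x :: l2)[l1.length]? = some x := by
  induction l1 with
  | nil => rfl
  | cons h t ih => simpa using ih

theorem stepA_merge_eval (css : List (PySem.Set Int)) (a b w : Int) (i j : Nat)
    (sa sb : PySem.Set Int) (hscan : scanSets css a b = (some i, some j))
    (hgi : css[i]? = some sa) (hgj : css[j]? = some sb)
    (hsa : sa ≠ []) (hsb : sb ≠ []) (hne : PySem.Set.equal sa sb = false) :
    stepA css (a, b, w) = pyRemoveSet (css.set i (PySem.Set.update sa sb)) sb := by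
  simp [stepA, hscan, hgi, hgj, hne, hsa, hsb]

theorem stepA_same_eval (css : List (PySem.Set Int)) (a b w : Int) (i j : Nat)
    (sa sb : PySem.Set Int) (hscan : scanSets css a b = (some i, some j))
    (hgi : css[i]? = some sa) (hgj : css[j]? = some sb)
    (hsa : sa ≠ []) (hsb : sb ≠ []) (hne : PySem.Set.equal sa sb = true) :
    stepA css (a, b, w) = css := by
  simp [stepA, hscan, hgi, hgj, hne, hsa, hsb]

theorem stepA_addb_eval (css : List (PySem.Set Int)) (a b w : Int) (i : Nat)
    (sa : PySem.Set Int) (hscan : scanSets css a b = (some i, none))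
    (hgi : css[i]? = some sa) (hsa : sa ≠ []) :
    stepA css (a, b, w) = css.set i (PySem.Set.add sa b) := by
  simp [stepA, hscan, hgi, hsa]

theorem stepA_adda_eval (css : List (PySem.Set Int)) (a b w : Int) (j : Nat)
    (sb : PySem.Set Int) (hscan : scanSets css a b = (none, some j))
    (hgj : css[j]? = some sb) (hsb : sb ≠ []) :
    stepA css (a, b, w) = css.set j (PySem.Set.add sb a) := by
  simp [stepA, hscan, hgj, hsb]

theorem stepA_new_eval (css : List (PySem.Set Int)) (a b w : Int)
    (hscan : scanSets css a b = (none, none)) :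
    stepA css (a, b, w) = css ++ [PySem.Set.ofList [a, b]] := by
  simp [stepA, hscan]

theorem scan_eval_found (members : PySem.Dict Int (List Int)) (hk1 : members.keys.Nodup)
    (hk3 : ∀ p ∈ members.items, ∀ q ∈ members.items, p.1 ≠ q.1 → ∀ x ∈ p.2, x ∉ q.2)
    (x : Int) {c : Int} {m : List Int} {u v : List (Int × List Int)}
    (hm : (c, m) ∈ members.items) (hx : x ∈ m)
    (hsplit : members.items = u ++ (c, m) :: v) :
    members.values.zipIdx.foldl
        (fun acc p => if PySem.Set.contains p.1 x then some p.2 else acc) none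
      = some u.length
    ∧ members.values[u.length]? = some m := by
  have hvs : members.values
      = u.map (fun q => q.2) ++ m :: v.map (fun q => q.2) := by
    simp [PySem.Dict.values, hsplit]
  have hv := (keys_facts members hk1 hsplit).2
  have hnolater : ∀ t ∈ v.map (fun q => q.2), x ∉ t := by
    intro t ht
    obtain ⟨q, hq, rfl⟩ := List.mem_map.mp ht
    have hqmem : q ∈ members.items := by rw [hsplit]; simp [hq]
    exact hk3 (c, m) hm q hqmem (fun hcq => hv q hq hcq.symm) x hx
  constructor
  · rw [hvs]
    have := scan_found (u.map (fun q => q.2)) m (v.map (fun q => q.2)) x 0 none hx hnolater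
    simpa using this
  · rw [hvs]
    have := get?_at_len (u.map (fun q : Int × List Int => q.2)) m (v.map (fun q => q.2))
    simpa using this

theorem scan_eval_none (members : PySem.Dict Int (List Int)) (x : Int)
    (hnone : ∀ p ∈ members.items, x ∉ p.2) :
    members.values.zipIdx.foldl
        (fun acc p => if PySem.Set.contains p.1 x then some p.2 else acc) none = none := by
  apply scan_none
  intro s hs
  obtain ⟨p, hp, rfl⟩ := List.mem_map.mp (show s ∈ members.items.map (fun q => q.2) from hs)
  exact hnone p hp

theorem contains_of_mem_items (members : PySem.Dict Int (List Int)) {c : Int} {m : List Int}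
    (hm : (c, m) ∈ members.items) : members.contains c = true := by
  rw [PySem.Dict.contains_iff_mem_keys]
  exact List.mem_map.mpr ⟨(c, m), hm, rfl⟩

theorem step_main (compOf : PySem.Dict Int Int) (members : PySem.Dict Int (List Int))
    (nextId : Int) (arc : Int × Int × Int) (h : PVInv compOf members nextId) :
    stepA members.values arc = (stepB (compOf, members, nextId) arc).2.1.values ∧
    PVInv (stepB (compOf, members, nextId) arc).1 (stepB (compOf, members, nextId) arc).2.1
        (stepB (compOf, members, nextId) arc).2.2 := by
  obtain ⟨hk1, hk2, hk3, hk4, hk5⟩ := h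
  obtain ⟨a, b, w⟩ := arc
  have hnomem : ∀ x : Int, compOf.get? x = none → ∀ p ∈ members.items, x ∉ p.2 := by
    intro x hx p hp hxp
    have := (hk4 x p.1).mpr ⟨p.2, by simpa using hp, hxp⟩
    rw [hx] at this; simp at this
  cases hga : compOf.get? a with
  | some ca =>
    obtain ⟨ma, hma, haa⟩ := (hk4 a ca).mp hga
    obtain ⟨u, v, hsplit1⟩ := List.append_of_mem hma
    obtain ⟨hscan_a, hget_a⟩ := scan_eval_found members hk1 hk3 a hma haa hsplit1
    have hmane : ma ≠ [] := (hk2 (ca, ma) hma).1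
    have hmand : ma.Nodup := (hk2 (ca, ma) hma).2
    obtain ⟨hu1, hv1⟩ := keys_facts members hk1 hsplit1
    cases hgb : compOf.get? b with
    | some cb =>
      obtain ⟨mb, hmb, hbb⟩ := (hk4 b cb).mp hgb
      by_cases hcc : ca = cb
      · -- a and b already in the same set: both sides leave the state unchanged
        subst hcc
        have hmm : mb = ma := val_unique members hk1 hmb hma
        rw [hmm] at hmb hbb
        have hB : stepB (compOf, members, nextId) (a, b, w) = (compOf, members, nextId) := by
          simp [stepB, hga, hgb]
        rw [hB]
        refine ⟨?_, hk1, hk2, hk3, hk4, hk5⟩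
        obtain ⟨hscan_b, -⟩ := scan_eval_found members hk1 hk3 b hmb hbb hsplit1
        exact stepA_same_eval _ a b w _ _ ma ma
          (by rw [scanSets_eq, hscan_a, hscan_b]) hget_a hget_a hmane hmane
          (equal_refl_set ma)
      · -- merge: A fuses set_a with set_b and removes set_b; B rewires the dicts
        obtain ⟨u', v', hsplit2⟩ := List.append_of_mem hmb
        obtain ⟨hscan_b, hget_b⟩ := scan_eval_found members hk1 hk3 b hmb hbb hsplit2
        have hmbne : mb ≠ [] := (hk2 (cb, mb) hmb).1
        have hmbnd : mb.Nodup := (hk2 (cb, mb) hmb).2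
        have hdis1 : ∀ x ∈ ma, x ∉ mb := hk3 (ca, ma) hma (cb, mb) hmb hcc
        have hdis2 : ∀ x ∈ mb, x ∉ ma := hk3 (cb, mb) hmb (ca, ma) hma (fun hh => hcc hh.symm)
        have hne : PySem.Set.equal ma mb = false := equal_false_left a haa (hdis1 a haa)
        have hgetD : members.getD cb [] = mb := PySem.Dict.getD_of_mem_items _ hmb hk1 []
        have hB : stepB (compOf, members, nextId) (a, b, w)
            = (mb.foldl (fun d x => d.insert x ca) compOf,
               (members.modify ca [] (fun m => m ++ mb)).erase cb, nextId) := by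
          simp [stepB, hga, hgb, hcc, hgetD]
        rw [hB]
        -- the items list after modify
        have hupd : PySem.Set.update ma mb = ma ++ mb :=
          PySem.Set.update_eq_append_of_disjoint ma mb hmbnd hdis2
        have hmodItems : (members.modify ca [] (fun m => m ++ mb)).items
            = u ++ (ca, ma ++ mb) :: v := by
          simp only [PySem.Dict.modify]
          rw [PySem.Dict.getD_of_mem_items _ hma hk1]
          rw [PySem.Dict.items_insert_of_contains _ _ (contains_of_mem_items members hma),
              hsplit1, map_replace_split u v ca ma (ma ++ mb) hu1 hv1]
        have hEitems : ((members.modify ca [] (fun m => m ++ mb)).erase cb).items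
            = (u ++ (ca, ma ++ mb) :: v).filter (fun p => !(p.1 == cb)) := by
          simp [PySem.Dict.erase, hmodItems]
        -- membership characterisations of the new items list
        have hmemold : ∀ p ∈ u ++ (ca, ma ++ mb) :: v,
            p = (ca, ma ++ mb) ∨ (p ∈ members.items ∧ p.1 ≠ ca) := by
          intro p hp
          rcases List.mem_append.mp hp with hpu | hpc
          · exact Or.inr ⟨by rw [hsplit1]; simp [hpu], hu1 p hpu⟩
          · rcases List.mem_cons.mp hpc with hmid | hpv
            · exact Or.inl hmid
            · exact Or.inr ⟨by rw [hsplit1]; simp [hpv], hv1 p hpv⟩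
        have hkeyuniq : ∀ p ∈ members.items, p.1 = cb → p = (cb, mb) := by
          rintro ⟨k, m2⟩ hp hpc
          simp only at hpc
          subst hpc
          rw [val_unique members hk1 hp hmb]
        -- pointwise: a set in the updated list equals set_b exactly at key cb
        have hpw : ∀ p ∈ u ++ (ca, ma ++ mb) :: v,
            PySem.Set.equal p.2 mb = (p.1 == cb) := by
          intro p hp
          rcases hmemold p hp with rfl | ⟨hpm, hpa⟩
          · have : ((ca, ma ++ mb).1 == cb) = false := by simpa using hcc
            rw [this]
            exact equal_false_left a (by simp [haa]) (hdis1 a haa)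
          · by_cases hpc : p.1 = cb
            · rw [hkeyuniq p hpm hpc]
              simp [equal_refl_set]
            · have : (p.1 == cb) = false := by simpa using hpc
              rw [this]
              exact equal_false_right b hbb
                (hk3 (cb, mb) hmb p hpm (fun hh => hpc hh.symm) b hbb)
        have hkeyseq : (u ++ (ca, ma ++ mb) :: v).map (fun p => p.1)
            = members.keys := by
          simp [PySem.Dict.keys, hsplit1]
        have hcount : ((u ++ (ca, ma ++ mb) :: v).map (fun q => q.2)).countP
            (fun s => PySem.Set.equal s mb) ≤ 1 := by
          rw [List.countP_map]
          rw [List.countP_congr (q := fun p : Int × List Int => p.1 == cb)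
            (fun p hp => by simp [Function.comp, hpw p hp])]
          have : List.countP ((fun k => k == cb) ∘ (fun p : Int × List Int => p.1))
              (u ++ (ca, ma ++ mb) :: v)
              = List.count cb ((u ++ (ca, ma ++ mb) :: v).map (fun p => p.1)) := by
            rw [List.count, List.countP_map]
          calc List.countP (fun p : Int × List Int => p.1 == cb) (u ++ (ca, ma ++ mb) :: v)
              = List.count cb ((u ++ (ca, ma ++ mb) :: v).map (fun p => p.1)) := this
            _ ≤ 1 := by rw [hkeyseq]; exact List.nodup_iff_count_le_one.mp hk1 cb
        have hset : members.values.set u.length (ma ++ mb)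
            = (u ++ (ca, ma ++ mb) :: v).map (fun q => q.2) := by
          have hvs : members.values
              = u.map (fun q => q.2) ++ ma :: v.map (fun q => q.2) := by
            simp [PySem.Dict.values, hsplit1]
          rw [hvs, show u.length = (u.map (fun q : Int × List Int => q.2)).length by simp,
              set_at_len]
          simp
        have hAside : stepA members.values (a, b, w)
            = ((u ++ (ca, ma ++ mb) :: v).filter (fun p => !(p.1 == cb))).map
                (fun q => q.2) := by
          rw [stepA_merge_eval _ a b w u.length u'.length ma mb
              (by rw [scanSets_eq, hscan_a, hscan_b]) hget_a hget_b hmane hmbne hne]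
          rw [hupd, hset, pyRemoveSet_eq_filter _ _ hcount, List.filter_map]
          congr 1
          exact List.filter_congr (fun p hp => by simp [hpw p hp])
        refine ⟨by rw [hAside]; simp [PySem.Dict.values, hEitems], ?_, ?_, ?_, ?_, ?_⟩
        · -- keys Nodup
          have hkk : ((members.modify ca [] (fun m => m ++ mb)).erase cb).keys
              = ((u ++ (ca, ma ++ mb) :: v).filter (fun p => !(p.1 == cb))).map
                  (fun x => x.1) := by
            simp [PySem.Dict.keys, hEitems]
          rw [hkk]
          exact List.Nodup.sublist
            (List.Sublist.map (fun x : Int × List Int => x.1) List.filter_sublist)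
            (hkeyseq ▸ hk1)
        · -- nonempty and Nodup member lists
          intro p hp
          rw [hEitems] at hp
          rcases hmemold p (List.mem_of_mem_filter hp) with rfl | ⟨hpm, -⟩
          · exact ⟨by simp [hmane], List.Nodup.append hmand hmbnd
              (fun x hx1 hx2 => hdis1 x hx1 hx2)⟩
          · exact hk2 p hpm
        · -- pairwise disjointness
          intro p hp q hq hpq x hxp
          rw [hEitems] at hp hq
          have hqcb : ¬ q.1 = cb := by
            have := List.of_mem_filter hq; simpa using this
          have hpcb : ¬ p.1 = cb := by
            have := List.of_mem_filter hp; simpa using this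
          rcases hmemold p (List.mem_of_mem_filter hp) with rfl | ⟨hpm, hpa⟩ <;>
            rcases hmemold q (List.mem_of_mem_filter hq) with rfl | ⟨hqm, hqa⟩
          · exact absurd rfl hpq
          · rcases List.mem_append.mp hxp with hx1 | hx2
            · exact hk3 (ca, ma) hma q hqm (fun hh => hqa hh.symm) x hx1
            · exact hk3 (cb, mb) hmb q hqm (fun hh => hqcb hh.symm) x hx2
          · intro hxq
            rcases List.mem_append.mp hxq with hx1 | hx2
            · exact hk3 p hpm (ca, ma) hma hpa x hxp hx1
            · exact hk3 p hpm (cb, mb) hmb hpcb x hxp hx2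
          · exact hk3 p hpm q hqm hpq x hxp
        · -- the lookup invariant
          intro y c
          rw [get?_foldl_insert_const, hEitems]
          constructor
          · intro hyc
            by_cases hy : y ∈ mb
            · rw [if_pos hy] at hyc
              obtain rfl : ca = c := Option.some.inj hyc
              refine ⟨ma ++ mb, ?_, by simp [hy]⟩
              apply List.mem_filter.mpr
              exact ⟨by simp, by simpa using hcc⟩
            · rw [if_neg hy] at hyc
              obtain ⟨m, hm, hym⟩ := (hk4 y c).mp hyc
              by_cases hc1 : c = cb
              · subst hc1
                rw [val_unique members hk1 hm hmb] at hym
                exact absurd hym hy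
              · by_cases hc2 : c = ca
                · subst hc2
                  rw [val_unique members hk1 hm hma] at hym
                  refine ⟨ma ++ mb, ?_, by simp [hym]⟩
                  apply List.mem_filter.mpr
                  exact ⟨by simp, by simpa using hcc⟩
                · refine ⟨m, ?_, hym⟩
                  apply List.mem_filter.mpr
                  refine ⟨?_, by simpa using hc1⟩
                  rw [hsplit1] at hm
                  rcases List.mem_append.mp hm with h1 | h1
                  · simp [h1]
                  · rcases List.mem_cons.mp h1 with h2 | h2
                    · exact absurd (congrArg Prod.fst h2) hc2
                    · simp [h2]
          · rintro ⟨m, hm, hym⟩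
            have hm' := List.mem_of_mem_filter hm
            have hmq : ¬ (c, m).1 = cb := by
              have := List.of_mem_filter hm; simpa using this
            rcases hmemold (c, m) hm' with hmid | ⟨hmm, -⟩
            · injection hmid with hc1 hm1
              rw [hm1] at hym
              rw [hc1]
              rcases List.mem_append.mp hym with hy1 | hy2
              · rw [if_neg (hdis1 y hy1)]
                exact (hk4 y ca).mpr ⟨ma, hma, hy1⟩
              · rw [if_pos hy2]
            · have hynb : y ∉ mb := by
                intro hy2
                exact hk3 (c, m) hmm (cb, mb) hmb (by simpa using hmq) y hym hy2
              rw [if_neg hynb]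
              exact (hk4 y c).mpr ⟨m, hmm, hym⟩
        · -- key bound
          intro p hp
          rw [hEitems] at hp
          rcases hmemold p (List.mem_of_mem_filter hp) with rfl | ⟨hpm, -⟩
          · exact hk5 (ca, ma) hma
          · exact hk5 p hpm
    | none =>
      -- b is new: A adds b to set_a in place; B records b under ca
      have hbn := hnomem b hgb
      have hB : stepB (compOf, members, nextId) (a, b, w)
          = (compOf.insert b ca, members.modify ca [] (fun m => m ++ [b]), nextId) := by
        simp [stepB, hga, hgb]
      rw [hB]
      have hmodItems : (members.modify ca [] (fun m => m ++ [b])).items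
          = u ++ (ca, ma ++ [b]) :: v := by
        simp only [PySem.Dict.modify]
        rw [PySem.Dict.getD_of_mem_items _ hma hk1]
        rw [PySem.Dict.items_insert_of_contains _ _ (contains_of_mem_items members hma),
            hsplit1, map_replace_split u v ca ma (ma ++ [b]) hu1 hv1]
      have hmemold : ∀ p ∈ u ++ (ca, ma ++ [b]) :: v,
          p = (ca, ma ++ [b]) ∨ (p ∈ members.items ∧ p.1 ≠ ca) := by
        intro p hp
        rcases List.mem_append.mp hp with hpu | hpc
        · exact Or.inr ⟨by rw [hsplit1]; simp [hpu], hu1 p hpu⟩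
        · rcases List.mem_cons.mp hpc with hmid | hpv
          · exact Or.inl hmid
          · exact Or.inr ⟨by rw [hsplit1]; simp [hpv], hv1 p hpv⟩
      have hbma : b ∉ ma := hbn (ca, ma) hma
      have hset : members.values.set u.length (ma ++ [b])
          = (u ++ (ca, ma ++ [b]) :: v).map (fun q => q.2) := by
        have hvs : members.values
            = u.map (fun q => q.2) ++ ma :: v.map (fun q => q.2) := by
          simp [PySem.Dict.values, hsplit1]
        rw [hvs, show u.length = (u.map (fun q : Int × List Int => q.2)).length by simp,
            set_at_len]
        simp
      have hAside : stepA members.values (a, b, w)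
          = (u ++ (ca, ma ++ [b]) :: v).map (fun q => q.2) := by
        rw [stepA_addb_eval _ a b w u.length ma
            (by rw [scanSets_eq, hscan_a, scan_eval_none members b hbn]) hget_a hmane]
        rw [PySem.Set.add_of_not_mem hbma, hset]
      refine ⟨by rw [hAside]; simp [PySem.Dict.values, hmodItems], ?_, ?_, ?_, ?_, ?_⟩
      · -- keys Nodup
        have : (members.modify ca [] (fun m => m ++ [b])).keys = members.keys := by
          simp [PySem.Dict.keys, hmodItems, hsplit1]
        rw [this]; exact hk1
      · intro p hp
        rw [hmodItems] at hp
        rcases hmemold p hp with rfl | ⟨hpm, -⟩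
        · exact ⟨by simp, by
            simpa [List.nodup_append] using ⟨hmand, fun x hx hxb => hbma (hxb ▸ hx)⟩⟩
        · exact hk2 p hpm
      · intro p hp q hq hpq x hxp
        rw [hmodItems] at hp hq
        rcases hmemold p hp with rfl | ⟨hpm, hpa⟩ <;>
          rcases hmemold q hq with rfl | ⟨hqm, hqa⟩
        · exact absurd rfl hpq
        · rcases List.mem_append.mp hxp with hx1 | hx2
          · exact hk3 (ca, ma) hma q hqm (fun hh => hqa hh.symm) x hx1
          · rw [List.mem_singleton.mp hx2]
            exact hbn q hqm
        · intro hxq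
          rcases List.mem_append.mp hxq with hx1 | hx2
          · exact hk3 p hpm (ca, ma) hma hpa x hxp hx1
          · exact hbn p hpm (List.mem_singleton.mp hx2 ▸ hxp)
        · exact hk3 p hpm q hqm hpq x hxp
      · intro y c
        rw [PySem.Dict.get?_insert, hmodItems]
        by_cases hyb : y = b
        · rw [if_pos hyb]
          constructor
          · intro hyc
            obtain rfl : ca = c := Option.some.inj hyc
            exact ⟨ma ++ [b], by simp, by simp [hyb]⟩
          · rintro ⟨m, hm, hym⟩
            rcases hmemold (c, m) hm with hmid | ⟨hmm, -⟩
            · injection hmid with h1 h2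
              rw [h1]
            · exact absurd (hyb ▸ hym) (hbn (c, m) hmm)
        · rw [if_neg hyb]
          constructor
          · intro hyc
            obtain ⟨m, hm, hym⟩ := (hk4 y c).mp hyc
            by_cases hc2 : c = ca
            · subst hc2
              rw [val_unique members hk1 hm hma] at hym
              exact ⟨ma ++ [b], by simp, by simp [hym]⟩
            · refine ⟨m, ?_, hym⟩
              rw [hsplit1] at hm
              rcases List.mem_append.mp hm with h1 | h1
              · simp [h1]
              · rcases List.mem_cons.mp h1 with h2 | h2
                · exact absurd (congrArg Prod.fst h2) hc2
                · simp [h2]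
          · rintro ⟨m, hm, hym⟩
            rcases hmemold (c, m) hm with hmid | ⟨hmm, -⟩
            · injection hmid with hc1 hm1
              rw [hm1] at hym
              rw [hc1]
              rcases List.mem_append.mp hym with hy1 | hy2
              · exact (hk4 y ca).mpr ⟨ma, hma, hy1⟩
              · exact absurd (List.mem_singleton.mp hy2) hyb
            · exact (hk4 y c).mpr ⟨m, hmm, hym⟩
      · intro p hp
        rw [hmodItems] at hp
        rcases hmemold p hp with rfl | ⟨hpm, -⟩
        · exact hk5 (ca, ma) hma
        · exact hk5 p hpm
  | none =>
    have han := hnomem a hga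
    cases hgb : compOf.get? b with
    | some cb =>
      -- a is new: A adds a to set_b in place; B records a under cb
      obtain ⟨mb, hmb, hbb⟩ := (hk4 b cb).mp hgb
      obtain ⟨u, v, hsplit2⟩ := List.append_of_mem hmb
      obtain ⟨hscan_b, hget_b⟩ := scan_eval_found members hk1 hk3 b hmb hbb hsplit2
      have hmbne : mb ≠ [] := (hk2 (cb, mb) hmb).1
      have hmbnd : mb.Nodup := (hk2 (cb, mb) hmb).2
      obtain ⟨hu1, hv1⟩ := keys_facts members hk1 hsplit2
      have hB : stepB (compOf, members, nextId) (a, b, w)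
          = (compOf.insert a cb, members.modify cb [] (fun m => m ++ [a]), nextId) := by
        simp [stepB, hga, hgb]
      rw [hB]
      have hmodItems : (members.modify cb [] (fun m => m ++ [a])).items
          = u ++ (cb, mb ++ [a]) :: v := by
        simp only [PySem.Dict.modify]
        rw [PySem.Dict.getD_of_mem_items _ hmb hk1]
        rw [PySem.Dict.items_insert_of_contains _ _ (contains_of_mem_items members hmb),
            hsplit2, map_replace_split u v cb mb (mb ++ [a]) hu1 hv1]
      have hmemold : ∀ p ∈ u ++ (cb, mb ++ [a]) :: v,
          p = (cb, mb ++ [a]) ∨ (p ∈ members.items ∧ p.1 ≠ cb) := by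
        intro p hp
        rcases List.mem_append.mp hp with hpu | hpc
        · exact Or.inr ⟨by rw [hsplit2]; simp [hpu], hu1 p hpu⟩
        · rcases List.mem_cons.mp hpc with hmid | hpv
          · exact Or.inl hmid
          · exact Or.inr ⟨by rw [hsplit2]; simp [hpv], hv1 p hpv⟩
      have hamb : a ∉ mb := han (cb, mb) hmb
      have hset : members.values.set u.length (mb ++ [a])
          = (u ++ (cb, mb ++ [a]) :: v).map (fun q => q.2) := by
        have hvs : members.values
            = u.map (fun q => q.2) ++ mb :: v.map (fun q => q.2) := by
          simp [PySem.Dict.values, hsplit2]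
        rw [hvs, show u.length = (u.map (fun q : Int × List Int => q.2)).length by simp,
            set_at_len]
        simp
      have hAside : stepA members.values (a, b, w)
          = (u ++ (cb, mb ++ [a]) :: v).map (fun q => q.2) := by
        rw [stepA_adda_eval _ a b w u.length mb
            (by rw [scanSets_eq, hscan_b, scan_eval_none members a han]) hget_b hmbne]
        rw [PySem.Set.add_of_not_mem hamb, hset]
      refine ⟨by rw [hAside]; simp [PySem.Dict.values, hmodItems], ?_, ?_, ?_, ?_, ?_⟩
      · have : (members.modify cb [] (fun m => m ++ [a])).keys = members.keys := by
          simp [PySem.Dict.keys, hmodItems, hsplit2]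
        rw [this]; exact hk1
      · intro p hp
        rw [hmodItems] at hp
        rcases hmemold p hp with rfl | ⟨hpm, -⟩
        · exact ⟨by simp, by
            simpa [List.nodup_append] using ⟨hmbnd, fun x hx hxa => hamb (hxa ▸ hx)⟩⟩
        · exact hk2 p hpm
      · intro p hp q hq hpq x hxp
        rw [hmodItems] at hp hq
        rcases hmemold p hp with rfl | ⟨hpm, hpa⟩ <;>
          rcases hmemold q hq with rfl | ⟨hqm, hqa⟩
        · exact absurd rfl hpq
        · rcases List.mem_append.mp hxp with hx1 | hx2
          · exact hk3 (cb, mb) hmb q hqm (fun hh => hqa hh.symm) x hx1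
          · rw [List.mem_singleton.mp hx2]
            exact han q hqm
        · intro hxq
          rcases List.mem_append.mp hxq with hx1 | hx2
          · exact hk3 p hpm (cb, mb) hmb hpa x hxp hx1
          · exact han p hpm (List.mem_singleton.mp hx2 ▸ hxp)
        · exact hk3 p hpm q hqm hpq x hxp
      · intro y c
        rw [PySem.Dict.get?_insert, hmodItems]
        by_cases hya : y = a
        · rw [if_pos hya]
          constructor
          · intro hyc
            obtain rfl : cb = c := Option.some.inj hyc
            exact ⟨mb ++ [a], by simp, by simp [hya]⟩
          · rintro ⟨m, hm, hym⟩
            rcases hmemold (c, m) hm with hmid | ⟨hmm, -⟩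
            · injection hmid with h1 h2
              rw [h1]
            · exact absurd (hya ▸ hym) (han (c, m) hmm)
        · rw [if_neg hya]
          constructor
          · intro hyc
            obtain ⟨m, hm, hym⟩ := (hk4 y c).mp hyc
            by_cases hc2 : c = cb
            · subst hc2
              rw [val_unique members hk1 hm hmb] at hym
              exact ⟨mb ++ [a], by simp, by simp [hym]⟩
            · refine ⟨m, ?_, hym⟩
              rw [hsplit2] at hm
              rcases List.mem_append.mp hm with h1 | h1
              · simp [h1]
              · rcases List.mem_cons.mp h1 with h2 | h2
                · exact absurd (congrArg Prod.fst h2) hc2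
                · simp [h2]
          · rintro ⟨m, hm, hym⟩
            rcases hmemold (c, m) hm with hmid | ⟨hmm, -⟩
            · injection hmid with hc1 hm1
              rw [hm1] at hym
              rw [hc1]
              rcases List.mem_append.mp hym with hy1 | hy2
              · exact (hk4 y cb).mpr ⟨mb, hmb, hy1⟩
              · exact absurd (List.mem_singleton.mp hy2) hya
            · exact (hk4 y c).mpr ⟨m, hmm, hym⟩
      · intro p hp
        rw [hmodItems] at hp
        rcases hmemold p hp with rfl | ⟨hpm, -⟩
        · exact hk5 (cb, mb) hmb
        · exact hk5 p hpm
    | none =>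
      -- both endpoints are new: A appends set([a,b]); B opens component nextId
      have hbn := hnomem b hgb
      have hnotc : members.contains nextId = false := by
        cases hc : members.contains nextId with
        | false => rfl
        | true =>
          obtain ⟨p, hp, hpk⟩ :=
            List.mem_map.mp ((PySem.Dict.contains_iff_mem_keys _ _).mp hc)
          exact absurd (hpk ▸ hk5 p hp) (lt_irrefl nextId)
      have hB : stepB (compOf, members, nextId) (a, b, w)
          = ((compOf.insert a nextId).insert b nextId,
             members.insert nextId (if a == b then [a] else [a, b]), nextId + 1) := by
        simp [stepB, hga, hgb]
      rw [hB]
      have hnewItems : (members.insert nextId (if a == b then [a] else [a, b])).items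
          = members.items ++ [(nextId, if a == b then [a] else [a, b])] := by
        rw [PySem.Dict.items_insert_of_not_contains]
        exact hnotc
      have hofl : PySem.Set.ofList [a, b] = (if a == b then [a] else [a, b]) := by
        by_cases hab : a = b
        · subst hab; simp [PySem.Set.ofList, PySem.Set.empty, PySem.Set.add]
        · simp [PySem.Set.ofList, PySem.Set.empty, PySem.Set.add, hab]
          exact fun h => hab h.symm
      have hAside : stepA members.values (a, b, w)
          = members.values ++ [(if a == b then [a] else [a, b])] := by
        rw [stepA_new_eval _ a b w
            (by rw [scanSets_eq, scan_eval_none members a han, scan_eval_none members b hbn])]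
        rw [hofl]
      have hnewm : ∀ x : Int, (x ∈ (if a == b then [a] else [a, b])) ↔ (x = a ∨ x = b) := by
        intro x
        by_cases hab : a = b
        · subst hab; simp
        · simp [hab]
      have hnewVals : (members.insert nextId (if a == b then [a] else [a, b])).values
          = members.values ++ [(if a == b then [a] else [a, b])] := by
        simp only [PySem.Dict.values, hnewItems, List.map_append]
        rfl
      refine ⟨by rw [hAside, hnewVals], ?_, ?_, ?_, ?_, ?_⟩
      · have : (members.insert nextId (if a == b then [a] else [a, b])).keys
            = members.keys ++ [nextId] := by
          simp only [PySem.Dict.keys, hnewItems, List.map_append]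
          rfl
        rw [this, List.nodup_append]
        refine ⟨hk1, List.nodup_singleton _, ?_⟩
        intro k hkk k' hk' hkk'
        obtain ⟨p, hp, rfl⟩ := List.mem_map.mp hkk
        rw [List.mem_singleton.mp hk'] at hkk'
        exact absurd (hkk' ▸ hk5 p hp) (lt_irrefl nextId)
      · intro p hp
        rw [hnewItems] at hp
        rcases List.mem_append.mp hp with hpm | hpn
        · exact hk2 p hpm
        · rw [List.mem_singleton.mp hpn]
          by_cases hab : a = b <;> simp [hab]
      · intro p hp q hq hpq x hxp
        rw [hnewItems] at hp hq
        rcases List.mem_append.mp hp with hpm | hpn <;>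
          rcases List.mem_append.mp hq with hqm | hqn
        · exact hk3 p hpm q hqm hpq x hxp
        · rw [List.mem_singleton.mp hqn]
          intro hxq
          rcases (hnewm x).mp (by simpa using hxq) with rfl | rfl
          · exact han p hpm hxp
          · exact hbn p hpm hxp
        · rw [List.mem_singleton.mp hpn] at hxp
          rcases (hnewm x).mp (by simpa using hxp) with rfl | rfl
          · exact han q hqm
          · exact hbn q hqm
        · rw [List.mem_singleton.mp hpn, List.mem_singleton.mp hqn] at hpq
          exact absurd rfl hpq
      · intro y c
        rw [PySem.Dict.get?_insert, hnewItems]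
        by_cases hyb : y = b
        · rw [if_pos hyb]
          constructor
          · intro hyc
            obtain rfl : nextId = c := Option.some.inj hyc
            exact ⟨(if a == b then [a] else [a, b]), by simp, (hnewm y).mpr (Or.inr hyb)⟩
          · rintro ⟨m, hm, hym⟩
            rcases List.mem_append.mp hm with hmm | hmn
            · exact absurd (hyb ▸ hym) (hbn (c, m) hmm)
            · injection List.mem_singleton.mp hmn with h1 h2
              rw [h1]
        · rw [if_neg hyb, PySem.Dict.get?_insert]
          by_cases hya : y = a
          · rw [if_pos hya]
            constructor
            · intro hyc
              obtain rfl : nextId = c := Option.some.inj hyc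
              exact ⟨(if a == b then [a] else [a, b]), by simp, (hnewm y).mpr (Or.inl hya)⟩
            · rintro ⟨m, hm, hym⟩
              rcases List.mem_append.mp hm with hmm | hmn
              · exact absurd (hya ▸ hym) (han (c, m) hmm)
              · injection List.mem_singleton.mp hmn with h1 h2
                rw [h1]
          · rw [if_neg hya]
            constructor
            · intro hyc
              obtain ⟨m, hm, hym⟩ := (hk4 y c).mp hyc
              exact ⟨m, by simp [hm], hym⟩
            · rintro ⟨m, hm, hym⟩
              rcases List.mem_append.mp hm with hmm | hmn
              · exact (hk4 y c).mpr ⟨m, hmm, hym⟩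
              · obtain hcm := List.mem_singleton.mp hmn
                obtain rfl : m = (if a == b then [a] else [a, b]) := congrArg Prod.snd hcm
                rcases (hnewm y).mp hym with rfl | rfl
                · exact absurd rfl hya
                · exact absurd rfl hyb
      · intro p hp
        rw [hnewItems] at hp
        rcases List.mem_append.mp hp with hpm | hpn
        · have := hk5 p hpm
          show p.1 < nextId + 1
          omega
        · rw [List.mem_singleton.mp hpn]
          show nextId < nextId + 1
          omega

theorem fold_main (arcs : List (Int × Int × Int)) :
    ∀ (compOf : PySem.Dict Int Int) (members : PySem.Dict Int (List Int)) (nextId : Int),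
      PVInv compOf members nextId →
      arcs.foldl stepA members.values = (arcs.foldl stepB (compOf, members, nextId)).2.1.values ∧
      PVInv (arcs.foldl stepB (compOf, members, nextId)).1
          (arcs.foldl stepB (compOf, members, nextId)).2.1
          (arcs.foldl stepB (compOf, members, nextId)).2.2 := by
  induction arcs with
  | nil => intro compOf members nextId h; exact ⟨rfl, h⟩
  | cons arc rest ih =>
    intro compOf members nextId h
    obtain ⟨heq, hinv⟩ := step_main compOf members nextId arc h
    have := ih (stepB (compOf, members, nextId) arc).1
               (stepB (compOf, members, nextId) arc).2.1
               (stepB (compOf, members, nextId) arc).2.2 hinv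
    simpa [List.foldl_cons, heq] using this

theorem Inv_init : PVInv PySem.Dict.empty PySem.Dict.empty 0 := by
  refine ⟨?_, ?_, ?_, ?_, ?_⟩ <;>
    simp [PySem.Dict.empty, PySem.Dict.keys, PySem.Dict.items, PySem.Dict.get?]

-- ===== VERDICT (by name: the statement is the Claim_ definition above) =====
theorem ConnexSets_spec : Claim_equal_ConnexSets := by
  intro arcs _
  unfold Spec_ConnexSets ConnexSets ConnexSets_alt
  obtain ⟨heq, hinv⟩ := fold_main arcs PySem.Dict.empty PySem.Dict.empty 0 Inv_init
  have hvals : (PySem.Dict.empty : PySem.Dict Int (List Int)).values = [] := by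
    simp [PySem.Dict.empty, PySem.Dict.values]
  rw [hvals] at heq
  -- every member list is Nodup, so set(m) = m
  obtain ⟨-, hk2, -⟩ := hinv
  show List.foldl stepA [] arcs
      = ((arcs.foldl stepB (PySem.Dict.empty, PySem.Dict.empty, 0)).2.1.values.map
          (fun m => PySem.Set.ofList m))
  rw [heq]
  have hid : ∀ m ∈ (arcs.foldl stepB (PySem.Dict.empty, PySem.Dict.empty, 0)).2.1.values,
      PySem.Set.ofList m = id m := by
    intro m hm
    obtain ⟨p, hp, rfl⟩ := List.mem_map.mp hm
    exact PySem.Set.ofList_eq_self_of_nodup _ (hk2 p hp).2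
  rw [List.map_congr_left hid, List.map_id]
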